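-- pv_equiv track=rewrite | github.com/starpacker/pMHC_decoy_library | decoy_b/external/proteinmpnn/run_mpnn_comparison.py | build_fixed_positions
-- ===== SOURCE A (Python) =====
-- def build_fixed_positions(pdb_dict, masked_positions_0indexed, chain_order):
--     chain_lengths = []
--     chain_names = []
--     for ch in chain_order:
--         key = f"seq_chain_{ch}"
--         if key in pdb_dict:
--             chain_lengths.append(len(pdb_dict[key]))
--             chain_names.append(ch)
--
--     designed_by_chain = {ch: [] for ch in chain_names}
--     offset = 0
--     for i, ch in enumerate(chain_names):
--         ch_len = chain_lengths[i]
--         for pos in masked_positions_0indexed: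
--             if offset <= pos < offset + ch_len:
--                 pos_in_chain_1indexed = pos - offset + 1
--                 designed_by_chain[ch].append(pos_in_chain_1indexed)
--         offset += ch_len
--
--     fixed_positions = {}
--     offset = 0
--     for i, ch in enumerate(chain_names):
--         ch_len = chain_lengths[i]
--         all_positions = set(range(1, ch_len + 1))
--         designed_set = set(designed_by_chain[ch])
--         fixed_set = sorted(all_positions - designed_set)
--         fixed_positions[ch] = fixed_set
--         offset += ch_len
--
--     return fixed_positions
-- ===== SOURCE B (Python) =====
-- def build_fixed_positions(pdb_dict, masked_positions_0indexed, chain_order):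
--     masked = set(masked_positions_0indexed)
--     fixed_positions = {}
--     offset = 0
--     for ch in chain_order:
--         key = f"seq_chain_{ch}"
--         if key in pdb_dict:
--             ch_len = len(pdb_dict[key])
--             fixed_positions[ch] = [p for p in range(1, ch_len + 1)
--                                    if (offset + p - 1) not in masked]
--             offset += ch_len
--     return fixed_positions
-- ===== Notes on version B (the rewrite author's own statement) =====
-- stated objective: simpler
-- what changed: One pass over chains emitting each chain's fixed list directly in ascending order by testing global masked membership in a precomputed set, instead of A's three passes (length/name lists, a designed-positions dict filled by a chains-by-masked nested scan, then per-chain set difference plus sort).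
-- outside the precondition, e.g. on build_fixed_positions({'seq_chain_A': 'GG'}, [0], ['A', 'A']): A returns {'A': [2]}, B returns {'A': [1, 2]}
import Mathlib
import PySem

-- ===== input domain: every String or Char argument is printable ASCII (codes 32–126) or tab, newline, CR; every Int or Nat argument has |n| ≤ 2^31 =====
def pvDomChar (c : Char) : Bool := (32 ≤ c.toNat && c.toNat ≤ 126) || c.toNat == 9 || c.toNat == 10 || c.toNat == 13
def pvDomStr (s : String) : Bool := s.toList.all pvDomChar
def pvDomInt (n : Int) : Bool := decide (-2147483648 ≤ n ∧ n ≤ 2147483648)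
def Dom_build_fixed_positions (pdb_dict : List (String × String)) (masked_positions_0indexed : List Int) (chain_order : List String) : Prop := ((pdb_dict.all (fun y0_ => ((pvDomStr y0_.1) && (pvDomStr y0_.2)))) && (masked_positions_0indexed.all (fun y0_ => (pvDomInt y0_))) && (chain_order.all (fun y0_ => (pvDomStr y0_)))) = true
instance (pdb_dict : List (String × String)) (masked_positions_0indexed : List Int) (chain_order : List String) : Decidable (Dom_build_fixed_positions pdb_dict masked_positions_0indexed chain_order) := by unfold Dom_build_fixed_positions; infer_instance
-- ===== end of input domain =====

-- B replaces A's three passes (length/name lists, a chains×masked nested scan filling a designed-positions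
-- dict, then per-chain set difference + sort) by one pass over the chains that emits each chain's fixed
-- list directly in ascending order, testing membership of the global index in a set of masked positions.

-- ===== PORT A =====
def build_fixed_positions (pdb_dict : List (String × String)) (masked_positions_0indexed : List Int) (chain_order : List String) : List (String × List Int) :=
  let d := PySem.Dict.mk pdb_dict
  let st := chain_order.foldl (fun (st : List Int × List String) ch =>
      let key := "seq_chain_" ++ ch
      if d.contains key then (st.1 ++ [PySem.Str.len (d.getD key "")], st.2 ++ [ch]) else st)
    ([], [])
  let chain_lengths := st.1
  let chain_names := st.2
  let designed0 : PySem.Dict String (List Int) :=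
    chain_names.foldl (fun dd ch => dd.insert ch []) PySem.Dict.empty
  let mid := (PySem.List.enumerate chain_names).foldl
    (fun (st : PySem.Dict String (List Int) × Int) p =>
      let ch := p.2
      let ch_len := PySem.List.pyGetD chain_lengths p.1 0
      (masked_positions_0indexed.foldl
        (fun dd pos =>
          if st.2 ≤ pos ∧ pos < st.2 + ch_len then
            dd.modify ch [] (fun l => l ++ [pos - st.2 + 1])
          else dd) st.1,
       st.2 + ch_len))
    (designed0, 0)
  let designed := mid.1
  let fin := (PySem.List.enumerate chain_names).foldl
    (fun (st : PySem.Dict String (List Int) × Int) p =>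
      let ch := p.2
      let ch_len := PySem.List.pyGetD chain_lengths p.1 0
      let all_positions := PySem.Set.ofList (PySem.List.pyRange 1 (ch_len + 1) 1)
      let designed_set := PySem.Set.ofList (designed.getD ch [])
      let fixed_set := PySem.List.sorted (PySem.Set.diff all_positions designed_set) (fun x => x)
      (st.1.insert ch fixed_set, st.2 + ch_len))
    ((PySem.Dict.empty : PySem.Dict String (List Int)), 0)
  fin.1.items

-- ===== PORT B =====
def build_fixed_positions_alt (pdb_dict : List (String × String)) (masked_positions_0indexed : List Int) (chain_order : List String) : List (String × List Int) :=
  let d := PySem.Dict.mk pdb_dict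
  let masked := PySem.Set.ofList masked_positions_0indexed
  let fin := chain_order.foldl
    (fun (st : PySem.Dict String (List Int) × Int) ch =>
      let key := "seq_chain_" ++ ch
      if d.contains key then
        let ch_len := PySem.Str.len (d.getD key "")
        let fixed := (PySem.List.pyRange 1 (ch_len + 1) 1).filter
          (fun p => !(PySem.Set.contains masked (st.2 + p - 1)))
        (st.1.insert ch fixed, st.2 + ch_len)
      else st)
    ((PySem.Dict.empty : PySem.Dict String (List Int)), 0)
  fin.1.items

-- ===== PRECONDITION & SPEC =====
-- Pre_ excludes inputs whose chain_order repeats a chain that is present in pdb_dict: there A's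
-- designed-positions dict merges the duplicate occurrences and its overwritten dict entry is an
-- accidental artefact of dict re-insertion, a defensible corner neither behaviour specifies.
def Pre_build_fixed_positions (pdb_dict : List (String × String)) (masked_positions_0indexed : List Int) (chain_order : List String) : Prop :=
  (chain_order.filter (fun ch => (PySem.Dict.mk pdb_dict).contains ("seq_chain_" ++ ch))).Nodup
instance (pdb_dict : List (String × String)) (masked_positions_0indexed : List Int) (chain_order : List String) : Decidable (Pre_build_fixed_positions pdb_dict masked_positions_0indexed chain_order) := by unfold Pre_build_fixed_positions; infer_instance

def pvWitness_build_fixed_positions : (List (String × String)) × List Int × List String :=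
  ([("seq_chain_A", "GGG"), ("seq_chain_B", "QQ")], ([0, 2, 3, -1, 9], ["A", "B", "C"]))

def Spec_build_fixed_positions (pdb_dict : List (String × String)) (masked_positions_0indexed : List Int) (chain_order : List String) (out : List (String × List Int)) : Prop := out = build_fixed_positions_alt pdb_dict masked_positions_0indexed chain_order
instance (pdb_dict : List (String × String)) (masked_positions_0indexed : List Int) (chain_order : List String) (out : List (String × List Int)) : Decidable (Spec_build_fixed_positions pdb_dict masked_positions_0indexed chain_order out) := by unfold Spec_build_fixed_positions; infer_instance

-- ===== CLAIM (what is proved, stated in full; the proofs are below) =====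
def Claim_equal_build_fixed_positions : Prop := ∀ (pdb_dict : List (String × String)) (masked_positions_0indexed : List Int) (chain_order : List String), Dom_build_fixed_positions pdb_dict masked_positions_0indexed chain_order → Pre_build_fixed_positions pdb_dict masked_positions_0indexed chain_order → Spec_build_fixed_positions pdb_dict masked_positions_0indexed chain_order (build_fixed_positions pdb_dict masked_positions_0indexed chain_order)

-- ===== LEMMAS AND PROOFS =====

-- the chains actually processed, annotated with their length and running global offset
def pvAnn (lenf : String → Int) : Int → List String → List (String × Int × Int)
  | _, [] => []
  | off, ch :: t => (ch, lenf ch, off) :: pvAnn lenf (off + lenf ch) t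

theorem pv_ann_map_fst (lenf : String → Int) : ∀ (ns : List String) (off : Int),
    (pvAnn lenf off ns).map Prod.fst = ns := by
  intro ns
  induction ns with
  | nil => intro off; rfl
  | cons ch t ih => intro off; simp [pvAnn, ih]

theorem pv_zip_self_map {α β : Type} (g : α → β) : ∀ (l : List α),
    l.zip (l.map g) = l.map (fun x => (x, g x)) := by
  intro l
  induction l with
  | nil => rfl
  | cons x t ih => simp [ih]

def pvAnnotate : Int → List (String × Int) → List (String × Int × Int)
  | _, [] => []
  | off, c :: t => (c.1, c.2, off) :: pvAnnotate (off + c.2) t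

theorem pv_annotate_fold {σ : Type} (g : σ → String → Int → Int → σ) :
    ∀ (cs : List (String × Int)) (off : Int) (s : σ),
    cs.foldl (fun (st : σ × Int) c => (g st.1 c.1 c.2 st.2, st.2 + c.2)) (s, off)
    = ((pvAnnotate off cs).foldl (fun s t => g s t.1 t.2.1 t.2.2) s,
       off + (cs.map Prod.snd).sum) := by
  intro cs
  induction cs with
  | nil => intro off s; simp [pvAnnotate]
  | cons c t ih =>
    intro off s
    simp only [List.foldl_cons, pvAnnotate, List.map_cons, List.sum_cons, ih]
    congr 1
    ring

theorem pvAnnotate_map (lenf : String → Int) : ∀ (ns : List String) (off : Int),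
    pvAnnotate off (ns.map (fun ch => (ch, lenf ch))) = pvAnn lenf off ns := by
  intro ns
  induction ns with
  | nil => intro off; rfl
  | cons ch t ih => intro off; simp [pvAnnotate, pvAnn, ih]

theorem pv_first_loop (d : PySem.Dict String String) :
    ∀ (l : List String) (A0 : List Int) (B0 : List String),
    l.foldl (fun (st : List Int × List String) ch =>
        if d.contains ("seq_chain_" ++ ch) then
          (st.1 ++ [PySem.Str.len (d.getD ("seq_chain_" ++ ch) "")], st.2 ++ [ch]) else st)
      (A0, B0)
    = (A0 ++ (l.filter (fun ch => d.contains ("seq_chain_" ++ ch))).map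
          (fun ch => PySem.Str.len (d.getD ("seq_chain_" ++ ch) "")),
       B0 ++ l.filter (fun ch => d.contains ("seq_chain_" ++ ch))) := by
  intro l
  induction l with
  | nil => intro A0 B0; simp
  | cons ch t ih =>
    intro A0 B0
    simp only [List.foldl_cons]
    by_cases h : d.contains ("seq_chain_" ++ ch) = true
    · rw [if_pos h, ih]
      simp [h]
    · rw [if_neg h, ih]
      simp only [Bool.not_eq_true] at h
      simp [h]

theorem pv_enum_zip {σ : Type} (f : σ → String → Int → σ) :
    ∀ (ns : List String) (ls0 ls : List Int) (init : σ), ns.length = ls.length →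
    (PySem.List.enumerate ns (ls0.length : Int)).foldl
        (fun st p => f st p.2 (PySem.List.pyGetD (ls0 ++ ls) p.1 0)) init
    = (ns.zip ls).foldl (fun st q => f st q.1 q.2) init := by
  intro ns
  induction ns with
  | nil => intro ls0 ls init h; simp [PySem.List.enumerate_nil]
  | cons n t ih =>
    intro ls0 ls init h
    cases ls with
    | nil => simp at h
    | cons l ls' =>
      rw [PySem.List.enumerate_cons]
      simp only [List.foldl_cons, List.zip_cons_cons]
      have hget : PySem.List.pyGetD (ls0 ++ l :: ls') (ls0.length : Int) 0 = l := by
        rw [PySem.List.pyGetD_natCast]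
        simp
      rw [hget]
      have := ih (ls0 ++ [l]) ls' (f init n l) (by simpa using h)
      simpa using this

theorem pv_enum_zip0 {σ : Type} (f : σ → String → Int → σ) (ns : List String) (ls : List Int)
    (init : σ) (h : ns.length = ls.length) :
    (PySem.List.enumerate ns).foldl (fun st p => f st p.2 (PySem.List.pyGetD ls p.1 0)) init
    = (ns.zip ls).foldl (fun st q => f st q.1 q.2) init := by
  have := pv_enum_zip f ns [] ls init h
  simpa using this

theorem pv_ann_fold {σ : Type} (g : σ → String → Int → Int → σ) (lenf : String → Int) :
    ∀ (ns : List String) (off : Int) (s : σ),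
    ns.foldl (fun (st : σ × Int) ch => (g st.1 ch (lenf ch) st.2, st.2 + lenf ch)) (s, off)
    = ((pvAnn lenf off ns).foldl (fun s t => g s t.1 t.2.1 t.2.2) s,
       off + (ns.map lenf).sum) := by
  intro ns
  induction ns with
  | nil => intro off s; simp [pvAnn]
  | cons ch t ih =>
    intro off s
    simp only [List.foldl_cons, pvAnn, List.map_cons, List.sum_cons, ih]
    congr 1
    ring

theorem pv_getD_init : ∀ (ns : List String) (dd : PySem.Dict String (List Int)) (ch : String),
    dd.getD ch [] = [] →
    (ns.foldl (fun dd ch => dd.insert ch ([] : List Int)) dd).getD ch [] = [] := by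
  intro ns
  induction ns with
  | nil => intro dd ch h; simpa using h
  | cons n t ih =>
    intro dd ch h
    simp only [List.foldl_cons]
    exact ih _ _ (by rw [PySem.Dict.getD_insert]; split <;> simp [h])

theorem pv_modify_constkey (masked : List Int) (cond : Int → Prop) [DecidablePred cond]
    (f : Int → Int) (ch : String) :
    ∀ (dd : PySem.Dict String (List Int)),
    (masked.foldl (fun dd pos => if cond pos then dd.modify ch [] (fun l => l ++ [f pos]) else dd) dd).getD ch []
    = dd.getD ch [] ++ (masked.filter (fun pos => decide (cond pos))).map f := by
  induction masked with
  | nil => intro dd; simp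
  | cons pos t ih =>
    intro dd
    by_cases h : cond pos
    · simp only [List.foldl_cons, if_pos h, ih, PySem.Dict.getD_modify_self]
      simp [h]
    · simp only [List.foldl_cons, if_neg h, ih]
      simp [h]

theorem pv_modify_constkey_ne (masked : List Int) (cond : Int → Prop) [DecidablePred cond]
    (f : Int → Int) (ch ch' : String) (hne : ch' ≠ ch) :
    ∀ (dd : PySem.Dict String (List Int)),
    (masked.foldl (fun dd pos => if cond pos then dd.modify ch [] (fun l => l ++ [f pos]) else dd) dd).getD ch' []
    = dd.getD ch' [] := by
  induction masked with
  | nil => intro dd; simp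
  | cons pos t ih =>
    intro dd
    by_cases h : cond pos
    · simp only [List.foldl_cons, if_pos h, ih]
      rw [PySem.Dict.getD_modify_of_ne _ _ _ hne]
    · simp only [List.foldl_cons, if_neg h, ih]

theorem pv_designed_ne (masked : List Int) :
    ∀ (ann : List (String × Int × Int)) (dd : PySem.Dict String (List Int)) (ch : String),
    (∀ t ∈ ann, t.1 ≠ ch) →
    (ann.foldl (fun dd t => masked.foldl
        (fun dd pos => if t.2.2 ≤ pos ∧ pos < t.2.2 + t.2.1 then
            dd.modify t.1 [] (fun l => l ++ [pos - t.2.2 + 1]) else dd) dd) dd).getD ch []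
    = dd.getD ch [] := by
  intro ann
  induction ann with
  | nil => intro dd ch _; rfl
  | cons t0 rest ih =>
    intro dd ch h
    simp only [List.foldl_cons]
    rw [ih _ _ (fun t ht => h t (List.mem_cons_of_mem _ ht))]
    exact pv_modify_constkey_ne masked _ _ _ _ (fun he => h t0 (List.mem_cons_self) he.symm) dd

theorem pv_designed (masked : List Int) :
    ∀ (ann : List (String × Int × Int)) (dd : PySem.Dict String (List Int)) (t0 : String × Int × Int),
    (ann.map Prod.fst).Nodup → t0 ∈ ann →
    (ann.foldl (fun dd t => masked.foldl
        (fun dd pos => if t.2.2 ≤ pos ∧ pos < t.2.2 + t.2.1 then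
            dd.modify t.1 [] (fun l => l ++ [pos - t.2.2 + 1]) else dd) dd) dd).getD t0.1 []
    = dd.getD t0.1 []
      ++ (masked.filter (fun pos => decide (t0.2.2 ≤ pos ∧ pos < t0.2.2 + t0.2.1))).map
           (fun pos => pos - t0.2.2 + 1) := by
  intro ann
  induction ann with
  | nil => intro dd t0 _ h; simp at h
  | cons t rest ih =>
    intro dd t0 hnd hmem
    simp only [List.map_cons, List.nodup_cons] at hnd
    rcases List.mem_cons.mp hmem with rfl | hmem'
    · simp only [List.foldl_cons]
      rw [pv_designed_ne masked rest _ t0.1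
        (fun t ht he => hnd.1 (he ▸ List.mem_map_of_mem ht))]
      exact pv_modify_constkey masked _ _ _ dd
    · simp only [List.foldl_cons]
      rw [ih _ _ hnd.2 hmem']
      have hne : t0.1 ≠ t.1 := by
        intro he
        exact hnd.1 (he ▸ List.mem_map_of_mem hmem')
      rw [pv_modify_constkey_ne masked _ _ _ _ hne]

theorem pv_value_eq (masked : List Int) (L off : Int) :
    PySem.List.sorted (PySem.Set.diff (PySem.Set.ofList (PySem.List.pyRange 1 (L + 1) 1))
      (PySem.Set.ofList ((masked.filter (fun pos => decide (off ≤ pos ∧ pos < off + L))).map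
        (fun pos => pos - off + 1)))) (fun x => x)
    = (PySem.List.pyRange 1 (L + 1) 1).filter
        (fun p => !(PySem.Set.contains (PySem.Set.ofList masked) (off + p - 1))) := by
  have hpw : (PySem.List.pyRange 1 (L + 1) 1).Pairwise (· < ·) :=
    PySem.List.pairwise_lt_pyRange_one 1 (L + 1)
  have hnd : (PySem.List.pyRange 1 (L + 1) 1).Nodup := hpw.nodup
  rw [PySem.Set.ofList_eq_self_of_nodup _ hnd]
  have hdiff : ∀ (t : PySem.Set Int),
      PySem.Set.diff (PySem.List.pyRange 1 (L + 1) 1) t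
      = (PySem.List.pyRange 1 (L + 1) 1).filter (fun x => !t.contains x) := fun t => rfl
  rw [hdiff]
  rw [PySem.List.sorted_eq_of_perm_of_pairwise_lt _ _ _ (List.Perm.refl _) (hpw.filter _)]
  apply List.filter_congr
  intro x hx
  rw [PySem.List.mem_pyRange_one] at hx
  congr 1
  have h1 : PySem.Set.contains (PySem.Set.ofList ((masked.filter
      (fun pos => decide (off ≤ pos ∧ pos < off + L))).map (fun pos => pos - off + 1))) x
      = true ↔ (off + x - 1) ∈ masked := by
    rw [PySem.Set.contains_iff, PySem.Set.mem_ofList]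
    simp only [List.mem_map, List.mem_filter, decide_eq_true_eq]
    constructor
    · rintro ⟨pos, ⟨hm, _, _⟩, rfl⟩
      have : off + (pos - off + 1) - 1 = pos := by ring
      rwa [this]
    · intro hm
      exact ⟨off + x - 1, ⟨hm, by omega, by omega⟩, by ring⟩
  have h2 : PySem.Set.contains (PySem.Set.ofList masked) (off + x - 1) = true
      ↔ (off + x - 1) ∈ masked := by
    rw [PySem.Set.contains_iff, PySem.Set.mem_ofList]
  rw [← h2] at h1
  cases hc : PySem.Set.contains (PySem.Set.ofList masked) (off + x - 1) <;>
    cases hc' : PySem.Set.contains (PySem.Set.ofList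
      ((masked.filter (fun pos => decide (off ≤ pos ∧ pos < off + L))).map
        (fun pos => pos - off + 1))) x <;> simp_all

-- ===== VERDICT (by name: the statement is the Claim_ definition above) =====
theorem build_fixed_positions_spec : Claim_equal_build_fixed_positions := by
  intro pdb masked chain _hdom hpre
  unfold Spec_build_fixed_positions
  unfold Pre_build_fixed_positions at hpre
  unfold build_fixed_positions build_fixed_positions_alt
  dsimp only
  generalize hg : chain.foldl (fun (st : List Int × List String) ch =>
      if (PySem.Dict.mk pdb).contains ("seq_chain_" ++ ch) then
        (st.1 ++ [PySem.Str.len ((PySem.Dict.mk pdb).getD ("seq_chain_" ++ ch) "")], st.2 ++ [ch])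
      else st) ([], []) = FL
  have hFL : FL = ((chain.filter (fun ch => (PySem.Dict.mk pdb).contains ("seq_chain_" ++ ch))).map
        (fun ch => PySem.Str.len ((PySem.Dict.mk pdb).getD ("seq_chain_" ++ ch) "")),
      chain.filter (fun ch => (PySem.Dict.mk pdb).contains ("seq_chain_" ++ ch))) := by
    rw [← hg, pv_first_loop]
    simp
  have hlen : FL.2.length = FL.1.length := by rw [hFL]; simp
  -- B side: drop absent chains, then annotate with offsets
  rw [PySem.List.foldl_if_eq_foldl_filter]
  have hB := pv_ann_fold
    (g := fun (dd : PySem.Dict String (List Int)) ch len off =>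
      dd.insert ch ((PySem.List.pyRange 1 (len + 1) 1).filter
        (fun p => !(PySem.Set.contains (PySem.Set.ofList masked) (off + p - 1)))))
    (lenf := fun ch => PySem.Str.len ((PySem.Dict.mk pdb).getD ("seq_chain_" ++ ch) ""))
    (chain.filter (fun ch => (PySem.Dict.mk pdb).contains ("seq_chain_" ++ ch))) 0 PySem.Dict.empty
  simp only [] at hB
  rw [hB]
  -- A middle loop: enumerate → zip fold → annotated fold
  have hM := pv_enum_zip0
    (f := fun (st : PySem.Dict String (List Int) × Int) ch len =>
      (masked.foldl (fun dd pos => if st.2 ≤ pos ∧ pos < st.2 + len then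
          dd.modify ch [] (fun l => l ++ [pos - st.2 + 1]) else dd) st.1, st.2 + len))
    FL.2 FL.1 (FL.2.foldl (fun dd ch => dd.insert ch ([] : List Int)) PySem.Dict.empty, 0) hlen
  simp only [] at hM
  rw [hM]
  have hM2 := pv_annotate_fold
    (g := fun (dd : PySem.Dict String (List Int)) ch len off =>
      masked.foldl (fun dd pos => if off ≤ pos ∧ pos < off + len then
          dd.modify ch [] (fun l => l ++ [pos - off + 1]) else dd) dd)
    (FL.2.zip FL.1) 0 (FL.2.foldl (fun dd ch => dd.insert ch ([] : List Int)) PySem.Dict.empty)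
  simp only [] at hM2
  rw [hM2]
  dsimp only
  generalize hDES : (pvAnnotate 0 (FL.2.zip FL.1)).foldl
      (fun dd t => masked.foldl (fun dd pos => if t.2.2 ≤ pos ∧ pos < t.2.2 + t.2.1 then
          dd.modify t.1 [] (fun l => l ++ [pos - t.2.2 + 1]) else dd) dd)
      (FL.2.foldl (fun dd ch => dd.insert ch ([] : List Int)) PySem.Dict.empty) = DES
  -- A third loop: enumerate → zip fold → annotated fold
  have hT := pv_enum_zip0
    (f := fun (st : PySem.Dict String (List Int) × Int) ch len =>
      (st.1.insert ch (PySem.List.sorted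
          ((PySem.Set.ofList (PySem.List.pyRange 1 (len + 1) 1)).diff
            (PySem.Set.ofList (DES.getD ch []))) (fun x => x)),
       st.2 + len))
    FL.2 FL.1 ((PySem.Dict.empty : PySem.Dict String (List Int)), 0) hlen
  simp only [] at hT
  rw [hT]
  have hT2 := pv_annotate_fold
    (g := fun (dd : PySem.Dict String (List Int)) ch len off =>
      dd.insert ch (PySem.List.sorted
          ((PySem.Set.ofList (PySem.List.pyRange 1 (len + 1) 1)).diff
            (PySem.Set.ofList (DES.getD ch []))) (fun x => x)))
    (FL.2.zip FL.1) 0 PySem.Dict.empty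
  simp only [] at hT2
  rw [hT2]
  dsimp only
  -- unify the two annotated chain lists
  have hz : FL.2.zip FL.1
      = (chain.filter (fun ch => (PySem.Dict.mk pdb).contains ("seq_chain_" ++ ch))).map
          (fun ch => (ch, PySem.Str.len ((PySem.Dict.mk pdb).getD ("seq_chain_" ++ ch) ""))) := by
    rw [hFL]
    exact pv_zip_self_map _ _
  rw [hz, pvAnnotate_map] at hDES ⊢
  rw [hFL] at hDES
  dsimp only at hDES
  -- both sides are insert-folds over the same fresh distinct keys
  have hnd : ((pvAnn (fun ch => PySem.Str.len ((PySem.Dict.mk pdb).getD ("seq_chain_" ++ ch) "")) 0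
      (chain.filter (fun ch => (PySem.Dict.mk pdb).contains ("seq_chain_" ++ ch)))).map Prod.fst).Nodup := by
    rw [pv_ann_map_fst]
    exact hpre
  rw [PySem.Dict.items_foldl_insert_fresh _ _ _ _ (by simp) hnd,
      PySem.Dict.items_foldl_insert_fresh _ _ _ _ (by simp) hnd]
  simp only [show (PySem.Dict.empty : PySem.Dict String (List Int)).items = [] from rfl, List.nil_append]
  apply List.map_congr_left
  intro t ht
  rw [← hDES,
      pv_designed masked _ _ t hnd ht,
      pv_getD_init _ _ _ (by simp),
      List.nil_append, pv_value_eq]
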